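-- pv_equiv track=rewrite | github.com/Groovylein/adventofcode-2024 | day_1/day_1.py | transform
-- ===== SOURCE A (Python) =====
-- def transform(inp):
--     l_1 = []
--     l_2 = []
--     l_inp = inp.strip().split()
--     for i in range(0, (len(l_inp)-1), 2):
--         l_1.append(int(l_inp[i]))
--         l_2.append(int(l_inp[i + 1]))
--     return l_1, l_2
-- ===== SOURCE B (Python) =====
-- def transform(inp):
--     # distribute tokens by index parity into a 2-slot table, trim, then convert
--     table = [[], []]
--     for i, tok in enumerate(inp.strip().split()):
--         table[i & 1].append(tok)
--     evens, odds = table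
--     del evens[len(odds):]          # drop a trailing unpaired token (never converted)
--     return [int(t) for t in evens], [int(t) for t in odds]
-- ===== Notes on version B (the rewrite author's own statement) =====
-- stated objective: alternative
-- what changed: A walks pairs with a step-2 index loop converting both members in lockstep; B never forms pairs: one pass dispatches each raw token by index parity into a 2-slot table, trims the even slot to the odd slot's length (dropping any trailing unpaired token), and only then converts each slot to ints in separate passes.
import Mathlib
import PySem

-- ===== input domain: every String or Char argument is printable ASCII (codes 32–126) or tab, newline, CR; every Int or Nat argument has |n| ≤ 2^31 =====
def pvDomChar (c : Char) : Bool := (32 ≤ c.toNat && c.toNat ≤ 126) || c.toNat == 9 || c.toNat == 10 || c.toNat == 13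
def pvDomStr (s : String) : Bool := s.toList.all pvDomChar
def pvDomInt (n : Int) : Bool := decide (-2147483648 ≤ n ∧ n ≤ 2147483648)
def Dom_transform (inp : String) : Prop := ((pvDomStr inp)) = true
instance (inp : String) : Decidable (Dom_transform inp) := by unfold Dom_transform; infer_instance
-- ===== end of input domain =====

-- B replaces A's step-2 pair loop by a different decomposition: one pass dispatching raw
-- tokens by index parity into a 2-slot table, a trim of the even slot, then int conversion.

-- int(s); Pre_transform guarantees ofStr? is some on every token actually converted
def pyInt (s : String) : Int := (PySem.Int.ofStr? s).getD 0

-- ===== PORT A =====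
def transform (inp : String) : List Int × List Int :=
  let l_inp := PySem.Str.split₀ (PySem.Str.strip inp)
  (PySem.List.pyRange 0 ((l_inp.length : Int) - 1) 2).foldl
    (fun acc i =>
      (acc.1 ++ [pyInt (PySem.List.pyGetD l_inp i "")],
       acc.2 ++ [pyInt (PySem.List.pyGetD l_inp (i + 1) "")]))
    ([], [])

-- ===== PORT B =====
-- table = [[], []]; for i, tok in enumerate(toks): table[i & 1].append(tok)
-- (the 2-slot table is a pair; i & 1 == 0 is i % 2 == 0); then trim evens, then convert
def transform_alt (inp : String) : List Int × List Int :=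
  let table := (PySem.List.enumerate (PySem.Str.split₀ (PySem.Str.strip inp)) 0).foldl
    (fun (t : List String × List String) it =>
      if it.1 % 2 == 0 then (t.1 ++ [it.2], t.2) else (t.1, t.2 ++ [it.2]))
    ([], [])
  let evens := table.1.take table.2.length
  (evens.map (fun t => pyInt t), table.2.map (fun t => pyInt t))

-- ===== PRECONDITION & SPEC =====
-- Pre_ excludes exactly the inputs where a token that gets paired (a trailing unpaired
-- token is never converted) is not parseable by int(): there both Pythons raise ValueError.
def Pre_transform (inp : String) : Prop :=
  ∀ t ∈ (PySem.Str.split₀ (PySem.Str.strip inp)).take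
      (2 * ((PySem.Str.split₀ (PySem.Str.strip inp)).length / 2)),
    (PySem.Int.ofStr? t).isSome = true
instance (inp : String) : Decidable (Pre_transform inp) := by unfold Pre_transform; infer_instance
def pvWitness_transform : String := "3 4   1 2"

def Spec_transform (inp : String) (out : List Int × List Int) : Prop := out = transform_alt inp
instance (inp : String) (out : List Int × List Int) : Decidable (Spec_transform inp out) := by unfold Spec_transform; infer_instance

-- ===== CLAIM (what is proved, stated in full; the proofs are below) =====
def Claim_equal_transform : Prop := ∀ (inp : String), Dom_transform inp → Pre_transform inp → Spec_transform inp (transform inp)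

-- ===== LEMMAS AND PROOFS =====

-- proof-only helpers: the tokens at even / odd positions
def pvEvens {α : Type} : List α → List α
  | [] => []
  | [x] => [x]
  | x :: _ :: r => x :: pvEvens r

def pvOdds {α : Type} : List α → List α
  | [] => []
  | [_] => []
  | _ :: y :: r => y :: pvOdds r

-- proof-only helper: the pairs A's loop visits
def pairsOf : List String → List (String × String)
  | [] => []
  | [_] => []
  | x :: y :: r => (x, y) :: pairsOf r

-- the Nat core: indexing the even/odd positions two at a time IS pairsOf
theorem range_pairs_eq_pairsOf (l : List String) (d : String) :
    (List.range (l.length / 2)).map (fun k => (l.getD (2 * k) d, l.getD (2 * k + 1) d))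
      = pairsOf l := by
  induction l using pairsOf.induct with
  | case1 => simp [pairsOf]
  | case2 x => simp [pairsOf]
  | case3 x y r ih =>
    have hlen : (x :: y :: r).length / 2 = r.length / 2 + 1 := by simp; omega
    rw [hlen, List.range_succ_eq_map]
    simp only [List.map_cons, List.map_map, pairsOf]
    refine congrArg₂ _ (by simp) ?_
    rw [← ih]
    refine List.map_congr_left fun k _ => ?_
    have h1 : 2 * (k + 1) = (2 * k + 1) + 1 := by ring
    have h2 : 2 * (k + 1) + 1 = ((2 * k + 1) + 1) + 1 := by ring
    simp only [Function.comp, h1, List.getD_cons_succ]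

-- A's stepping range rewritten as List.range of the pair count
theorem pyRange_step2 (n : Nat) :
    PySem.List.pyRange 0 ((n : Int) - 1) 2
      = (List.range (n / 2)).map (fun k : Nat => 2 * (k : Int)) := by
  rw [PySem.List.pyRange_of_pos 0 ((n : Int) - 1) (by omega)]
  have hcount : (if (0 : Int) < (n : Int) - 1 then ((((n : Int) - 1) - 0 + 2 - 1) / 2).toNat else 0) = n / 2 := by
    split_ifs with h
    · omega
    · omega
  rw [hcount]
  exact List.map_congr_left fun k _ => by ring

-- A's loop equals the pairsOf view
theorem loop_eq (l : List String) :
    (PySem.List.pyRange 0 ((l.length : Int) - 1) 2).foldl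
      (fun acc i =>
        (acc.1 ++ [pyInt (PySem.List.pyGetD l i "")],
         acc.2 ++ [pyInt (PySem.List.pyGetD l (i + 1) "")]))
      ([], [])
    = ((pairsOf l).map (fun p => pyInt p.1), (pairsOf l).map (fun p => pyInt p.2)) := by
  rw [PySem.List.foldl_prod_mk
      (f := fun acc i => acc ++ [pyInt (PySem.List.pyGetD l i "")])
      (g := fun acc i => acc ++ [pyInt (PySem.List.pyGetD l (i + 1) "")])]
  rw [PySem.List.foldl_append_singleton_eq_map, PySem.List.foldl_append_singleton_eq_map]
  rw [pyRange_step2 l.length]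
  have key := range_pairs_eq_pairsOf l ""
  have h1 : ∀ k : Nat, (2 * (k : Int)) = ((2 * k : Nat) : Int) := fun k => by push_cast; ring
  have h2 : ∀ k : Nat, ((2 * k : Nat) : Int) + 1 = ((2 * k + 1 : Nat) : Int) := fun k => by push_cast; ring
  rw [Prod.mk.injEq]; refine ⟨?_, ?_⟩ <;> simp only [List.nil_append, List.map_map] <;> rw [← key, List.map_map] <;>
    exact List.map_congr_left fun k _ => by
      simp only [Function.comp, h1 k, h2 k, PySem.List.pyGetD_natCast]

-- B's parity-dispatch fold equals (evens, odds); the start index advances 2 per step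
theorem parity_fold (l : List String) : ∀ (s : Int) (a1 a2 : List String), s % 2 = 0 →
    (PySem.List.enumerate l s).foldl
      (fun (t : List String × List String) it =>
        if it.1 % 2 == 0 then (t.1 ++ [it.2], t.2) else (t.1, t.2 ++ [it.2]))
      (a1, a2)
    = (a1 ++ pvEvens l, a2 ++ pvOdds l) := by
  induction l using pvEvens.induct with
  | case1 => intro s a1 a2 _; simp [pvEvens, pvOdds, PySem.List.enumerate_nil]
  | case2 x =>
    intro s a1 a2 hs
    simp [PySem.List.enumerate_cons, PySem.List.enumerate_nil, pvEvens, pvOdds, hs]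
  | case3 x y r ih =>
    intro s a1 a2 hs
    have hs1 : (s + 1) % 2 ≠ 0 := by omega
    have hs2 : (s + 1 + 1) % 2 = 0 := by omega
    simp only [PySem.List.enumerate_cons, List.foldl_cons]
    rw [if_pos (show (s % 2 == 0) = true by rw [beq_iff_eq]; omega),
        if_neg (show ¬ (((s + 1) % 2 == 0) = true) by rw [beq_iff_eq]; omega)]
    rw [ih (s + 1 + 1) _ _ hs2]
    simp [pvEvens, pvOdds, List.append_assoc]

theorem evens_take_eq (l : List String) :
    (pvEvens l).take (pvOdds l).length = (pairsOf l).map (fun p => p.1) := by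
  induction l using pairsOf.induct with
  | case1 => simp [pvEvens, pvOdds, pairsOf]
  | case2 x => simp [pvEvens, pvOdds, pairsOf]
  | case3 x y r ih => simp [pvEvens, pvOdds, pairsOf, ih]

theorem odds_eq (l : List String) :
    pvOdds l = (pairsOf l).map (fun p => p.2) := by
  induction l using pairsOf.induct with
  | case1 => simp [pvOdds, pairsOf]
  | case2 x => simp [pvOdds, pairsOf]
  | case3 x y r ih => simp [pvOdds, pairsOf, ih]

-- ===== VERDICT (by name: the statement is the Claim_ definition above) =====
-- the common core at an arbitrary token list (both ports zeta-reduce to the two sides)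
theorem main_eq (l : List String) :
    (PySem.List.pyRange 0 ((l.length : Int) - 1) 2).foldl
      (fun acc i =>
        (acc.1 ++ [pyInt (PySem.List.pyGetD l i "")],
         acc.2 ++ [pyInt (PySem.List.pyGetD l (i + 1) "")]))
      ([], [])
    = ((((PySem.List.enumerate l 0).foldl
          (fun (t : List String × List String) it =>
            if it.1 % 2 == 0 then (t.1 ++ [it.2], t.2) else (t.1, t.2 ++ [it.2]))
          ([], [])).1.take
        ((PySem.List.enumerate l 0).foldl
          (fun (t : List String × List String) it =>
            if it.1 % 2 == 0 then (t.1 ++ [it.2], t.2) else (t.1, t.2 ++ [it.2]))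
          ([], [])).2.length).map (fun t => pyInt t),
       ((PySem.List.enumerate l 0).foldl
          (fun (t : List String × List String) it =>
            if it.1 % 2 == 0 then (t.1 ++ [it.2], t.2) else (t.1, t.2 ++ [it.2]))
          ([], [])).2.map (fun t => pyInt t)) := by
  rw [loop_eq l, parity_fold l 0 [] [] (by decide)]
  simp only [List.nil_append]
  rw [evens_take_eq, odds_eq]
  simp [List.map_map, Function.comp]

theorem transform_spec : Claim_equal_transform := by
  intro inp _ _
  show transform inp = transform_alt inp
  exact main_eq (PySem.Str.split₀ (PySem.Str.strip inp))
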